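-- pv_equiv track=rewrite | github.com/Yyulliiaa/vk_homework2 | max_min_mult.py | max_min_multiplication
-- ===== SOURCE A (Python) =====
-- def max_min_multiplication(data):
--     if len(data) < 3:
--         return -1
--     min_ind = 1
--     max_ind = 2
--     i = 1
--     # для бинарного дерева, ветви которого смещены вправо, и все уровни кроме последнего полностью заполнены
--     while i < len(data):
--         min_ind = i
--         i = 2 * i + 1
--     i = 0
--     while i < len(data):
--         max_ind = i
--         i = 2 * i + 2
--     return data[min_ind] * data[max_ind]
-- ===== SOURCE B (Python) =====
-- def max_min_multiplication(data):
--     n = len(data)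
--     if n < 3:
--         return -1
--     min_ind = (1 << (n.bit_length() - 1)) - 1
--     max_ind = (1 << ((n + 1).bit_length() - 1)) - 2
--     return data[min_ind] * data[max_ind]
-- ===== Notes on version B (the rewrite author's own statement) =====
-- stated objective: simpler
-- what changed: Replaces both index-chasing while loops (i -> 2i+1 and i -> 2i+2) by closed-form bit_length formulas for the deepest-left (2^k-1) and deepest-right (2^k-2) indices.
import Mathlib
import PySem

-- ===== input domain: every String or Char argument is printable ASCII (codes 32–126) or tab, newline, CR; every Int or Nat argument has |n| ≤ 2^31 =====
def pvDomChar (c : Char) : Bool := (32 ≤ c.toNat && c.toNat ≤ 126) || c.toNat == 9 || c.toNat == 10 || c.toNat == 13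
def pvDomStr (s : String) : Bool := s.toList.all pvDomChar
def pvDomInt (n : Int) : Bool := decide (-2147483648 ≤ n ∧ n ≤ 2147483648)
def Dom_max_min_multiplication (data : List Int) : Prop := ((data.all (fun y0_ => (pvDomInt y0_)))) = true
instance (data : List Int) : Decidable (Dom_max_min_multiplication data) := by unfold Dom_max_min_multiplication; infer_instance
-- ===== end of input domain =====

-- B replaces A's two index-chasing while loops by closed-form bit_length formulas (simpler).

-- ===== PORT A =====
-- while i < n: min_ind = i; i = 2*i+1
def pvLoopMin (n minInd i : Nat) : Nat :=
  if i < n then pvLoopMin n i (2 * i + 1) else minInd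
termination_by n - i
decreasing_by omega

-- while i < n: max_ind = i; i = 2*i+2
def pvLoopMax (n maxInd i : Nat) : Nat :=
  if i < n then pvLoopMax n i (2 * i + 2) else maxInd
termination_by n - i
decreasing_by omega

def max_min_multiplication (data : List Int) : Int :=
  if data.length < 3 then -1
  else
    let minInd := pvLoopMin data.length 1 1
    let maxInd := pvLoopMax data.length 2 0
    -- data[min_ind], data[max_ind]: both indices are provably < len(data) here, so getD is exact
    data.getD minInd 0 * data.getD maxInd 0

-- ===== PORT B =====
-- Python's n.bit_length() for n ≥ 0
def pvBitLength (n : Nat) : Nat :=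
  if h : n = 0 then 0 else pvBitLength (n / 2) + 1
decreasing_by exact Nat.div_lt_self (by omega) (by omega)

def max_min_multiplication_alt (data : List Int) : Int :=
  let n := data.length
  if n < 3 then -1
  else
    let minInd := (1 <<< (pvBitLength n - 1)) - 1
    let maxInd := (1 <<< (pvBitLength (n + 1) - 1)) - 2
    data.getD minInd 0 * data.getD maxInd 0

-- ===== PRECONDITION & SPEC =====
def Spec_max_min_multiplication (data : List Int) (out : Int) : Prop := out = max_min_multiplication_alt data
instance (data : List Int) (out : Int) : Decidable (Spec_max_min_multiplication data out) := by unfold Spec_max_min_multiplication; infer_instance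

-- ===== CLAIM (what is proved, stated in full; the proofs are below) =====
def Claim_equal_max_min_multiplication : Prop := ∀ (data : List Int), Dom_max_min_multiplication data → Spec_max_min_multiplication data (max_min_multiplication data)

-- ===== LEMMAS AND PROOFS =====

theorem pvBitLength_eq (j : Nat) : ∀ n, 2 ^ j ≤ n → n < 2 ^ (j + 1) → pvBitLength n = j + 1 := by
  induction j with
  | zero =>
    intro n h1 h2
    have : n = 1 := by simp [pow_succ] at h1 h2; omega
    subst this; simp [pvBitLength]
  | succ j ih =>
    intro n h1 h2
    have hn : n ≠ 0 := by have : (0:Nat) < 2 ^ (j+1) := Nat.two_pow_pos _; omega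
    rw [pvBitLength, dif_neg hn]
    have e1 : 2 ^ (j + 1) = 2 ^ j * 2 := pow_succ 2 j
    have e2 : 2 ^ (j + 2) = 2 ^ (j + 1) * 2 := pow_succ 2 (j + 1)
    rw [ih (n / 2) (by omega) (by omega)]

theorem pvLoopMin_eq (n j m : Nat) (h : 2 ^ j - 1 < n) :
    pvLoopMin n m (2 ^ j - 1) = 2 ^ (pvBitLength n - 1) - 1 := by
  rw [pvLoopMin, if_pos h]
  have h1 : (1:Nat) ≤ 2 ^ j := Nat.one_le_two_pow
  have e1 : 2 ^ (j + 1) = 2 ^ j * 2 := pow_succ 2 j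
  have hstep : 2 * (2 ^ j - 1) + 1 = 2 ^ (j + 1) - 1 := by omega
  rw [hstep]
  by_cases h2 : 2 ^ (j + 1) - 1 < n
  · exact pvLoopMin_eq n (j + 1) (2 ^ j - 1) h2
  · rw [pvLoopMin, if_neg h2]
    have hb : pvBitLength n = j + 1 := pvBitLength_eq j n (by omega) (by omega)
    rw [hb]; simp
termination_by n - 2 ^ j
decreasing_by omega

theorem pvLoopMax_eq (n j m : Nat) (hj : 1 ≤ j) (h : 2 ^ j - 2 < n) :
    pvLoopMax n m (2 ^ j - 2) = 2 ^ (pvBitLength (n + 1) - 1) - 2 := by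
  rw [pvLoopMax, if_pos h]
  have h1 : (2:Nat) ≤ 2 ^ j := by calc (2:Nat) = 2 ^ 1 := rfl
                                       _ ≤ 2 ^ j := Nat.pow_le_pow_right (by omega) hj
  have e1 : 2 ^ (j + 1) = 2 ^ j * 2 := pow_succ 2 j
  have hstep : 2 * (2 ^ j - 2) + 2 = 2 ^ (j + 1) - 2 := by omega
  rw [hstep]
  by_cases h2 : 2 ^ (j + 1) - 2 < n
  · exact pvLoopMax_eq n (j + 1) (2 ^ j - 2) (by omega) h2
  · rw [pvLoopMax, if_neg h2]
    have hb : pvBitLength (n + 1) = j + 1 := pvBitLength_eq j (n + 1) (by omega) (by omega)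
    rw [hb]; simp
termination_by n - 2 ^ j
decreasing_by omega

-- ===== VERDICT (by name: the statement is the Claim_ definition above) =====
theorem max_min_multiplication_spec : Claim_equal_max_min_multiplication := by
  intro data _
  unfold Spec_max_min_multiplication max_min_multiplication max_min_multiplication_alt
  by_cases h : data.length < 3
  · simp [h]
  · simp only [h]
    have hmin : pvLoopMin data.length 1 1 = 2 ^ (pvBitLength data.length - 1) - 1 := by
      have := pvLoopMin_eq data.length 1 1 (by simpa using by omega)
      simpa using this
    have hmax : pvLoopMax data.length 2 0 = 2 ^ (pvBitLength (data.length + 1) - 1) - 2 := by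
      have := pvLoopMax_eq data.length 1 2 (by omega) (by simpa using by omega)
      simpa using this
    simp [hmin, hmax, Nat.one_shiftLeft]
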